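-- pv_equiv track=rewrite | github.com/Wolverine971/sparqlFormatter | sparqlParser.py | countBackTrack
-- ===== SOURCE A (Python) =====
-- def countBackTrack(text, start, end, target):
--     count = ''
--     # if start == -1 or start == 0:
--     #     return ''
--     select_pos = text.rfind(target, start, end)
--     if start == 0 or select_pos == -1:
--         return ''
--     for j in reversed(range(select_pos)):
--         if text[j] == '\n':
--             break
--         else:
--             count += ' '
--
--     return count
-- ===== SOURCE B (Python) =====
-- def countBackTrack(text, start, end, target):
--     select_pos = text.rfind(target, start, end)
--     if start == 0 or select_pos == -1:
--         return ''
--     nl = text.rfind('\n', 0, select_pos)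
--     return ' ' * (select_pos - nl - 1)
-- ===== Notes on version B (the rewrite author's own statement) =====
-- stated objective: simpler
-- what changed: The backward per-character loop (which appends one space per character until a newline) is replaced by a single rfind('\n', 0, select_pos) and a positional string multiplication ' ' * (select_pos - nl - 1).
import Mathlib
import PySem

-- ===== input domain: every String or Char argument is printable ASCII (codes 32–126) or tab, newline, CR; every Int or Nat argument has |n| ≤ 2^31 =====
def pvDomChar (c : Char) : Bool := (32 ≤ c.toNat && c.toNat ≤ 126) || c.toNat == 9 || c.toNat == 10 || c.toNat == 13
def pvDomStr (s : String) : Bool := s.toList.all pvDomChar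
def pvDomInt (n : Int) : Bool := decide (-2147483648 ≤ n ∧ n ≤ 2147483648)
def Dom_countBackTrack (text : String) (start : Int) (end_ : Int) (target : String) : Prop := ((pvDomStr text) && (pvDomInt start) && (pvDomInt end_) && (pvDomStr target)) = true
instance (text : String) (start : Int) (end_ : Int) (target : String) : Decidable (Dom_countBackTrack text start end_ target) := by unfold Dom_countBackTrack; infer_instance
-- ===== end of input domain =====

-- B replaces A's backward per-character counting loop by rfind('\n') plus a positional
-- space multiplication: simpler and shorter, same result since A appends a space for EVERY character.


-- ===== PORT A =====
-- the 'for j in reversed(range(select_pos))' loop: append ' ' per char, break at '\n'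
def pvLoopA (text : String) : List Int → String → String
  | [], count => count
  | j :: rest, count =>
    match PySem.Str.pyGet? text j with
    | some c => if c = '\n' then count else pvLoopA text rest (count ++ " ")
    | none => count


def countBackTrack (text : String) (start : Int) (end_ : Int) (target : String) : String :=
  let count := ""
  let select_pos := PySem.Str.rfindFrom text target start (some end_)
  if start = 0 ∨ select_pos = -1 then ""
  else pvLoopA text ((PySem.List.pyRange 0 select_pos 1).reverse) count

-- ===== PORT B =====
def countBackTrack_alt (text : String) (start : Int) (end_ : Int) (target : String) : String :=
  let select_pos := PySem.Str.rfindFrom text target start (some end_)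
  if start = 0 ∨ select_pos = -1 then ""
  else
    let nl := PySem.Str.rfindFrom text "\n" 0 (some select_pos)
    String.ofList (List.replicate (select_pos - nl - 1).toNat ' ')

-- ===== PRECONDITION & SPEC =====
def Spec_countBackTrack (text : String) (start : Int) (end_ : Int) (target : String) (out : String) : Prop := out = countBackTrack_alt text start end_ target
instance (text : String) (start : Int) (end_ : Int) (target : String) (out : String) : Decidable (Spec_countBackTrack text start end_ target out) := by unfold Spec_countBackTrack; infer_instance

-- ===== CLAIM (what is proved, stated in full; the proofs are below) =====
def Claim_equal_countBackTrack : Prop := ∀ (text : String) (start : Int) (end_ : Int) (target : String), Dom_countBackTrack text start end_ target → Spec_countBackTrack text start end_ target (countBackTrack text start end_ target)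

-- ===== LEMMAS AND PROOFS =====

theorem rfind_go_le (u sub : List Char) (m : Nat) : PySem.Chars.rfind.go u sub m ≤ (m : Int) := by
  induction m with
  | zero => unfold PySem.Chars.rfind.go; split <;> simp
  | succ j ih =>
    unfold PySem.Chars.rfind.go
    split
    · simp
    · exact le_trans ih (by omega)

theorem neg_one_le_rfind_go (u sub : List Char) (m : Nat) : (-1 : Int) ≤ PySem.Chars.rfind.go u sub m := by
  induction m with
  | zero => unfold PySem.Chars.rfind.go; split <;> simp
  | succ j ih =>
    unfold PySem.Chars.rfind.go
    split
    · omega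
    · exact ih

theorem rfind_go_succ (u sub : List Char) (j : Nat) :
    PySem.Chars.rfind.go u sub (j + 1)
      = if sub.isPrefixOf (List.drop (j + 1) u) then ((j + 1 : Nat) : Int) else PySem.Chars.rfind.go u sub j := by
  conv_lhs => unfold PySem.Chars.rfind.go

theorem rfind_le (u sub : List Char) : PySem.Chars.rfind u sub ≤ (u.length : Int) := rfind_go_le u sub u.length
theorem neg_one_le_rfind (u sub : List Char) : (-1 : Int) ≤ PySem.Chars.rfind u sub := neg_one_le_rfind_go u sub u.length


theorem rfind_core_bounds (s sub : List Char) (e st' : Int) (h0 : 0 ≤ st') (hen : e ≤ (s.length : Int))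
    (h : (if e < st' then (-1 : Int)
          else if PySem.Chars.rfind (List.drop st'.toNat (List.take e.toNat s)) sub = -1 then -1
          else st' + PySem.Chars.rfind (List.drop st'.toNat (List.take e.toNat s)) sub) ≠ -1) :
    0 ≤ (if e < st' then (-1 : Int)
          else if PySem.Chars.rfind (List.drop st'.toNat (List.take e.toNat s)) sub = -1 then -1
          else st' + PySem.Chars.rfind (List.drop st'.toNat (List.take e.toNat s)) sub)
    ∧ (if e < st' then (-1 : Int)
          else if PySem.Chars.rfind (List.drop st'.toNat (List.take e.toNat s)) sub = -1 then -1
          else st' + PySem.Chars.rfind (List.drop st'.toNat (List.take e.toNat s)) sub) ≤ (s.length : Int) := by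
  have hr1 : (-1 : Int) ≤ PySem.Chars.rfind (List.drop st'.toNat (List.take e.toNat s)) sub := neg_one_le_rfind _ _
  have hr2 : PySem.Chars.rfind (List.drop st'.toNat (List.take e.toNat s)) sub ≤ ((List.drop st'.toNat (List.take e.toNat s)).length : Int) := rfind_le _ _
  have hlen : ((List.drop st'.toNat (List.take e.toNat s)).length : Int) ≤ e - st' ∨ ((List.drop st'.toNat (List.take e.toNat s)).length : Int) ≤ 0 := by
    simp [List.length_drop, List.length_take]; omega
  split_ifs at h ⊢ <;> omega

theorem rfindFrom_bounds (s sub : List Char) (st : Int) (e? : Option Int)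
    (h : PySem.Chars.rfindFrom s sub st e? ≠ -1) :
    0 ≤ PySem.Chars.rfindFrom s sub st e? ∧ PySem.Chars.rfindFrom s sub st e? ≤ (s.length : Int) := by
  rcases e? with _ | ev
  · exact rfind_core_bounds s sub ((s.length : Int)) (if st < 0 then if st + (s.length : Int) < 0 then 0 else st + (s.length : Int) else st)
      (by split_ifs <;> omega) (by omega) h
  · exact rfind_core_bounds s sub
      (if (s.length : Int) < ev then (s.length : Int) else if ev < 0 then if ev + (s.length : Int) < 0 then 0 else ev + (s.length : Int) else ev)
      (if st < 0 then if st + (s.length : Int) < 0 then 0 else st + (s.length : Int) else st)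
      (by split_ifs <;> omega) (by split_ifs <;> omega) h

theorem prefix_nl (u : List Char) (j : Nat) (hj : j < u.length) :
    ['\n'].isPrefixOf (List.drop j u) = (u[j] == '\n') := by
  rw [List.drop_eq_getElem_cons hj]
  simp only [List.isPrefixOf]
  rw [Bool.and_comm]
  simp [BEq.comm]

theorem rfindFrom_nl (s : List Char) (p : Int) (h0 : 0 ≤ p) (hp : p ≤ (s.length : Int)) :
    PySem.Chars.rfindFrom s ['\n'] 0 (some p) = PySem.Chars.rfind (List.take p.toNat s) ['\n'] := by
  simp only [PySem.Chars.rfindFrom]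
  rw [if_neg (not_lt.mpr hp), if_neg (not_lt.mpr h0), if_neg (lt_irrefl (0 : Int)), if_neg (not_lt.mpr h0)]
  rw [Int.toNat_zero, List.drop_zero]
  by_cases hr : PySem.Chars.rfind (List.take p.toNat s) ['\n'] = -1
  · rw [if_pos hr, hr]
  · rw [if_neg hr, zero_add]

theorem loopA_eq (text : String) (p : Nat) (hp : p ≤ text.toList.length) :
    ∀ (j : Nat), j < p → ∀ (acc : String),
    pvLoopA text ((PySem.List.pyRange 0 ((j : Int) + 1) 1).reverse) acc
      = acc ++ String.ofList (List.replicate (((j : Int) - PySem.Chars.rfind.go (text.toList.take p) ['\n'] j).toNat) ' ') := by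
  intro j
  induction j with
  | zero =>
    intro hj acc
    have h01 : PySem.List.pyRange 0 ((0 : Nat) + 1 : Int) 1 = [(0 : Int)] := by
      rw [PySem.List.pyRange_one_cons (by norm_num), PySem.List.pyRange_one_eq_nil (by norm_num)]
    have h0p : 0 < text.toList.length := lt_of_lt_of_le hj hp
    have h0p' : 0 < (text.toList.take p).length := by rw [List.length_take]; omega
    have hget : PySem.Str.pyGet? text (0 : Int) = some (text.toList[0]'h0p) := by
      rw [show ((0 : Int)) = ((0 : Nat) : Int) by simp, PySem.Str.pyGet?_natCast]
      exact List.getElem?_eq_getElem h0p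
    have hpre : ['\n'].isPrefixOf (text.toList.take p) = ((text.toList[0]'h0p) == '\n') := by
      have h := prefix_nl _ 0 h0p'
      rw [List.drop_zero] at h
      rw [h]
      congr 1
      exact List.getElem_take
    rw [h01]
    unfold PySem.Chars.rfind.go
    simp only [List.reverse_cons, List.reverse_nil, List.nil_append, pvLoopA, hget, hpre]
    by_cases hc : text.toList[0]'h0p = '\n'
    · rw [if_pos hc, if_pos (by simp [hc])]
      apply String.ext; simp
    · rw [if_neg hc, if_neg (by simp [hc])]
      apply String.ext
      norm_num [String.toList_ofList]
      rfl
  | succ j ih =>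
    intro hj acc
    have hjp : j + 1 < p := hj
    have hjl : j + 1 < (text.toList.take p).length := by rw [List.length_take]; omega
    have hjl' : j + 1 < text.toList.length := lt_of_lt_of_le hjp hp
    have hsplit : PySem.List.pyRange 0 (((j + 1 : Nat) : Int) + 1) 1
        = PySem.List.pyRange 0 ((j : Int) + 1) 1 ++ [((j + 1 : Nat) : Int)] := by
      push_cast
      rw [PySem.List.pyRange_one_succ_right (by omega)]
    have hget : PySem.Str.pyGet? text (((j + 1 : Nat)) : Int) = some (text.toList[j + 1]'hjl') := by
      rw [PySem.Str.pyGet?_natCast]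
      exact List.getElem?_eq_getElem hjl'
    have hpre : ['\n'].isPrefixOf (List.drop (j + 1) (text.toList.take p)) = ((text.toList[j + 1]'hjl') == '\n') := by
      rw [prefix_nl _ (j + 1) hjl]
      congr 1
      exact List.getElem_take
    rw [hsplit]
    unfold PySem.Chars.rfind.go
    simp only [List.reverse_append, List.reverse_cons, List.reverse_nil, List.nil_append,
      List.cons_append, pvLoopA, hget, hpre]
    by_cases hc : text.toList[j + 1]'hjl' = '\n'
    · rw [if_pos hc, if_pos (by simp [hc])]
      apply String.ext; simp
    · rw [if_neg hc, if_neg (by simp [hc])]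
      rw [ih (by omega) (acc ++ " ")]
      have hg1 : (-1 : Int) ≤ PySem.Chars.rfind.go (text.toList.take p) ['\n'] j := neg_one_le_rfind_go _ _ _
      have hg2 : PySem.Chars.rfind.go (text.toList.take p) ['\n'] j ≤ (j : Int) := rfind_go_le _ _ _
      apply String.ext
      simp only [String.toList_append]
      have hcount : (((j + 1 : Nat) : Int) - PySem.Chars.rfind.go (text.toList.take p) ['\n'] j).toNat
          = (((j : Nat) : Int) - PySem.Chars.rfind.go (text.toList.take p) ['\n'] j).toNat + 1 := by
        omega
      rw [hcount]
      simp [List.replicate_succ, String.toList_ofList]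

theorem main_eq (text : String) (start : Int) (end_ : Int) (target : String) :
    countBackTrack text start end_ target = countBackTrack_alt text start end_ target := by
  unfold countBackTrack countBackTrack_alt
  set sp := PySem.Str.rfindFrom text target start (some end_) with hsp
  by_cases hg : start = 0 ∨ sp = -1
  · rw [if_pos hg, if_pos hg]
  · rw [if_neg hg, if_neg hg]
    have hne : sp ≠ -1 := fun h => hg (Or.inr h)
    have hne' : PySem.Chars.rfindFrom text.toList target.toList start (some end_) ≠ -1 := by
      rw [hsp, PySem.Str.rfindFrom_eq] at hne; exact hne
    have hb := rfindFrom_bounds text.toList target.toList start (some end_) hne'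
    rw [PySem.Str.rfindFrom_eq] at hsp
    have hb1 : 0 ≤ sp := hsp ▸ hb.1
    have hb2 : sp ≤ (text.toList.length : Int) := hsp ▸ hb.2
    have hnl : PySem.Str.rfindFrom text "\n" 0 (some sp)
        = PySem.Chars.rfind (List.take sp.toNat text.toList) ['\n'] := by
      rw [PySem.Str.rfindFrom_eq]
      rw [show ("\n" : String).toList = ['\n'] from rfl]
      exact rfindFrom_nl _ _ hb1 hb2
    have hlen : (List.take sp.toNat text.toList).length = sp.toNat := by
      rw [List.length_take]; omega
    rcases Nat.eq_zero_or_pos sp.toNat with hp0 | hp1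
    · have hsp0 : sp = 0 := by omega
      rw [hsp0]
      rw [PySem.List.pyRange_one_eq_nil (by norm_num)]
      have : PySem.Str.rfindFrom text "\n" 0 (some (0 : Int)) = -1 := by
        rw [hsp0] at hnl
        rw [hnl]
        simp [PySem.Chars.rfind, PySem.Chars.rfind.go, List.isPrefixOf]
      rw [this]
      simp [pvLoopA]
    · -- sp ≥ 1
      obtain ⟨q, hq⟩ : ∃ q : Nat, sp.toNat = q + 1 := ⟨sp.toNat - 1, by omega⟩
      have hspq : sp = ((q : Int)) + 1 := by omega
      rw [hq] at hlen hnl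
      rw [hspq] at hnl
      rw [hspq]
      show pvLoopA text ((PySem.List.pyRange 0 ((q : Int) + 1) 1).reverse) ""
        = String.ofList (List.replicate (((q : Int) + 1 - PySem.Str.rfindFrom text "\n" 0 (some ((q : Int) + 1)) - 1)).toNat ' ')
      rw [loopA_eq text (q + 1) (by omega) q (by omega) "", hnl]
      have hgo : PySem.Chars.rfind (List.take (q + 1) text.toList) ['\n']
          = PySem.Chars.rfind.go (List.take (q + 1) text.toList) ['\n'] q := by
        unfold PySem.Chars.rfind
        rw [hlen, rfind_go_succ]
        rw [if_neg (by rw [List.drop_eq_nil_of_le (by rw [List.length_take]; omega)]; simp [List.isPrefixOf])]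
      rw [hgo]
      have hg1 : (-1 : Int) ≤ PySem.Chars.rfind.go (List.take (q + 1) text.toList) ['\n'] q :=
        neg_one_le_rfind_go _ _ _
      have hg2 : PySem.Chars.rfind.go (List.take (q + 1) text.toList) ['\n'] q ≤ (q : Int) :=
        rfind_go_le _ _ _
      apply String.ext
      simp only [String.toList_append, String.toList_ofList]
      have hc : ((q : Int) + 1 - PySem.Chars.rfind.go (List.take (q + 1) text.toList) ['\n'] q - 1).toNat
          = ((q : Int) - PySem.Chars.rfind.go (List.take (q + 1) text.toList) ['\n'] q).toNat := by omega
      rw [hc]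
      rfl

-- ===== VERDICT (by name: the statement is the Claim_ definition above) =====
theorem countBackTrack_spec : Claim_equal_countBackTrack := by
  intro text start end_ target _
  unfold Spec_countBackTrack
  exact main_eq text start end_ target
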